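-- pv_equiv track=rewrite | github.com/jtbuter/leiden-university-irp | irp/experiments/tile_coding/understanding-tile-coding.py | coordinates_to_index
-- ===== SOURCE A (Python) =====
-- def coordinates_to_index(coordinates, tiles_per_dim):
--     indices = []
--     dims = len(coordinates[0])
--
--     for ntl, coordinate in enumerate(coordinates):
--         total_tiles = tiles_per_dim ** dims
--
--         tiling_index = 0
--
--         for dim, coord in enumerate(coordinate):
--             tiling_index += coord * tiles_per_dim ** dim
--
--         indices.append(tiling_index + total_tiles * ntl)
--
--     return indices
-- ===== SOURCE B (Python) =====
-- def coordinates_to_index(coordinates, tiles_per_dim):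
--     dims = len(coordinates[0])
--     total_tiles = tiles_per_dim ** dims
--
--     def row_value(row):
--         if not row:
--             return 0
--         return row[0] + tiles_per_dim * row_value(row[1:])
--
--     return [row_value(row) + total_tiles * i for i, row in enumerate(coordinates)]
-- ===== Notes on version B (the rewrite author's own statement) =====
-- stated objective: alternative
-- what changed: replaces A's accumulator loop computing a fresh power per element by a comprehension over enumerate whose per-row value is a recursive Horner evaluation (row[0] + tiles_per_dim * value(rest)), so no power is ever taken per element
import Mathlib
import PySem

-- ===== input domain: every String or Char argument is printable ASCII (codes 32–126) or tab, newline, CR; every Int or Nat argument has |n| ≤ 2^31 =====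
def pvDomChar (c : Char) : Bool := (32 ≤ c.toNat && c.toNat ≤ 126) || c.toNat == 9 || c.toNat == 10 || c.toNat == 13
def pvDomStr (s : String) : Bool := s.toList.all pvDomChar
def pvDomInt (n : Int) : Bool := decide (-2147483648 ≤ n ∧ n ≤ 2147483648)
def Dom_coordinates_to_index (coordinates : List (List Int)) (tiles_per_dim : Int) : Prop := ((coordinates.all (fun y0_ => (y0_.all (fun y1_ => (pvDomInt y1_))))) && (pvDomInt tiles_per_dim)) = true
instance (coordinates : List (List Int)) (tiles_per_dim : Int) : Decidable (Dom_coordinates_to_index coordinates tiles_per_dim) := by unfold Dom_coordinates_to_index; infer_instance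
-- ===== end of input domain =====

-- B replaces A's append-fold with a power per element by a map over the enumeration of a recursive Horner row value (no powers); same results on all nonempty inputs.


-- ===== PORT A =====
-- 'coordinates[0]' is guarded by Pre_ (nonempty list), so headD [] is exact there;
-- loop indices from enumerate are nonnegative, so '.toNat' on the power exponent is exact.
def coordinates_to_index (coordinates : List (List Int)) (tiles_per_dim : Int) : List Int :=
  let dims := (coordinates.headD []).length
  (PySem.List.enumerate coordinates).foldl
    (fun indices p =>
      let ntl := p.1
      let coordinate := p.2
      let total_tiles := tiles_per_dim ^ dims
      let tiling_index :=
        (PySem.List.enumerate coordinate).foldl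
          (fun t q => t + q.2 * tiles_per_dim ^ q.1.toNat) 0
      indices ++ [tiling_index + total_tiles * ntl]) []

-- ===== PORT B =====
-- row_value: recursive Horner evaluation of a row, no explicit powers
def pvRowValue (tiles_per_dim : Int) : List Int → Int
  | [] => 0
  | x :: xs => x + tiles_per_dim * pvRowValue tiles_per_dim xs

def coordinates_to_index_alt (coordinates : List (List Int)) (tiles_per_dim : Int) : List Int :=
  let dims := (coordinates.headD []).length
  let total_tiles := tiles_per_dim ^ dims
  (PySem.List.enumerate coordinates).map
    (fun p => pvRowValue tiles_per_dim p.2 + total_tiles * p.1)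

-- ===== PRECONDITION & SPEC =====
-- Pre_ excludes only coordinates = [], where both A and B raise IndexError on coordinates[0].
def Pre_coordinates_to_index (coordinates : List (List Int)) (tiles_per_dim : Int) : Prop :=
  coordinates ≠ []
instance (coordinates : List (List Int)) (tiles_per_dim : Int) : Decidable (Pre_coordinates_to_index coordinates tiles_per_dim) := by unfold Pre_coordinates_to_index; infer_instance
def pvWitness_coordinates_to_index : List (List Int) × Int := ([[1, 2], [0, 3]], 4)

def Spec_coordinates_to_index (coordinates : List (List Int)) (tiles_per_dim : Int) (out : List Int) : Prop := out = coordinates_to_index_alt coordinates tiles_per_dim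
instance (coordinates : List (List Int)) (tiles_per_dim : Int) (out : List Int) : Decidable (Spec_coordinates_to_index coordinates tiles_per_dim out) := by unfold Spec_coordinates_to_index; infer_instance

-- ===== CLAIM (what is proved, stated in full; the proofs are below) =====
def Claim_equal_coordinates_to_index : Prop := ∀ (coordinates : List (List Int)) (tiles_per_dim : Int), Dom_coordinates_to_index coordinates tiles_per_dim → Pre_coordinates_to_index coordinates tiles_per_dim → Spec_coordinates_to_index coordinates tiles_per_dim (coordinates_to_index coordinates tiles_per_dim)

-- ===== LEMMAS AND PROOFS =====

-- A's inner enumerate fold computes b^s * rowValue (power-sum = Horner value)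
theorem enumfold_eq_rowValue (b : Int) (xs : List Int) : ∀ (s : Nat) (t : Int),
    (PySem.List.enumerate xs (s : Int)).foldl (fun t q => t + q.2 * b ^ q.1.toNat) t
      = t + b ^ s * pvRowValue b xs := by
  induction xs with
  | nil => intro s t; simp [PySem.List.enumerate_nil, pvRowValue]
  | cons x xs ih =>
    intro s t
    rw [PySem.List.enumerate_cons]
    have h1 : ((s : Int) + 1) = ((s + 1 : Nat) : Int) := by push_cast; ring
    simp only [List.foldl_cons, h1, ih]
    have h2 : ((s : Int)).toNat = s := Int.toNat_natCast s
    simp only [h2, pvRowValue]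
    ring

-- A's outer append-fold is the map of the per-row value over the enumeration
theorem foldl_append_singleton {α β : Type} (g : α → β) (l : List α) :
    ∀ (acc : List β), l.foldl (fun acc p => acc ++ [g p]) acc = acc ++ l.map g := by
  induction l with
  | nil => intro acc; simp
  | cons x xs ih => intro acc; simp [ih]

-- ===== VERDICT (by name: the statement is the Claim_ definition above) =====
theorem coordinates_to_index_spec : Claim_equal_coordinates_to_index := by
  intro coordinates tiles_per_dim _ _
  unfold Spec_coordinates_to_index coordinates_to_index coordinates_to_index_alt
  simp only [foldl_append_singleton, List.nil_append]
  apply List.map_congr_left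
  intro p _
  have hA := enumfold_eq_rowValue tiles_per_dim p.2 0 0
  simp only [Nat.cast_zero, pow_zero, zero_add, one_mul] at hA
  exact congrArg (· + tiles_per_dim ^ (coordinates.headD []).length * p.1) hA
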